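-- pv_equiv track=rewrite | github.com/MetaFFI/plugin-sdk | idl_entities/python3/type_mapper.py | metaffi_type_to_python_type_annotation
-- ===== SOURCE A (Python) =====
-- from typing import Any, Optional, List, Tuple
--
-- def metaffi_type_to_python_type_annotation(metaffi_type: str, dimensions: int = 0, type_alias: Optional[str] = None) -> str:
--     """
--     Convert MetaFFI type string to Python type annotation.
--
--     Args:
--         metaffi_type: MetaFFI type string (e.g., "int32", "string8", "handle")
--         dimensions: Number of array dimensions (0 = not an array)
--         type_alias: Optional type alias for handle types
--
--     Returns:
--         Python type annotation string (e.g., "int", "str", "List[int]", "Any")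
--     """
--     # Handle arrays
--     if dimensions > 0:
--         base_type = metaffi_type_to_python_type_annotation(metaffi_type, 0, type_alias)
--         # For multi-dimensional arrays, nest List types
--         result = base_type
--         for _ in range(dimensions):
--             result = f"List[{result}]"
--         return result
--
--     # Map base types
--     type_mapping = {
--         # Integers
--         "int8": "int",
--         "int16": "int",
--         "int32": "int",
--         "int64": "int",
--         "uint8": "int",
--         "uint16": "int",
--         "uint32": "int",
--         "uint64": "int",
--         # Floats
--         "float32": "float",
--         "float64": "float",
--         # Strings
--         "string8": "str",
--         "string16": "str",
--         "string32": "str",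
--         # Characters
--         "char8": "str",
--         "char16": "str",
--         "char32": "str",
--         # Boolean
--         "bool": "bool",
--         # Handle
--         "handle": type_alias if type_alias else "Any",
--         # Callable
--         "callable": "Any",  # Python callable type
--         # Other
--         "any": "Any",
--         "null": "None",
--         "size": "int",
--     }
--
--     # Handle array types (e.g., "int32_array")
--     if metaffi_type.endswith("_array"):
--         base_type = metaffi_type[:-6]  # Remove "_array" suffix
--         base_annotation = type_mapping.get(base_type, "Any")
--         return f"List[{base_annotation}]"
--
--     return type_mapping.get(metaffi_type, "Any")
-- ===== SOURCE B (Python) =====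
-- from typing import Optional
--
--
-- def metaffi_type_to_python_type_annotation(metaffi_type: str, dimensions: int = 0, type_alias: Optional[str] = None) -> str:
--     """Flat, non-recursive version: strip one '_array' suffix, count total
--     List-wrapping levels, do a single dict lookup, wrap once."""
--     type_mapping = {
--         "int8": "int", "int16": "int", "int32": "int", "int64": "int",
--         "uint8": "int", "uint16": "int", "uint32": "int", "uint64": "int",
--         "float32": "float", "float64": "float",
--         "string8": "str", "string16": "str", "string32": "str",
--         "char8": "str", "char16": "str", "char32": "str",
--         "bool": "bool",
--         "handle": type_alias if type_alias else "Any",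
--         "callable": "Any",
--         "any": "Any",
--         "null": "None",
--         "size": "int",
--     }
--     wraps = max(dimensions, 0)
--     core = metaffi_type
--     if core.endswith("_array"):
--         core = core[:-6]
--         wraps += 1
--     return "List[" * wraps + type_mapping.get(core, "Any") + "]" * wraps
-- ===== Notes on version B (the rewrite author's own statement) =====
-- stated objective: faster
-- what changed: Replaces the recursive self-call and the two separate List-wrapping sites with a flat computation: strip one trailing array suffix, compute the total wrap count (max(dimensions,0) plus one for the suffix), do a single dict lookup on the core name and wrap it once with string repetition instead of repeated concatenation in a loop.
import Mathlib
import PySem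

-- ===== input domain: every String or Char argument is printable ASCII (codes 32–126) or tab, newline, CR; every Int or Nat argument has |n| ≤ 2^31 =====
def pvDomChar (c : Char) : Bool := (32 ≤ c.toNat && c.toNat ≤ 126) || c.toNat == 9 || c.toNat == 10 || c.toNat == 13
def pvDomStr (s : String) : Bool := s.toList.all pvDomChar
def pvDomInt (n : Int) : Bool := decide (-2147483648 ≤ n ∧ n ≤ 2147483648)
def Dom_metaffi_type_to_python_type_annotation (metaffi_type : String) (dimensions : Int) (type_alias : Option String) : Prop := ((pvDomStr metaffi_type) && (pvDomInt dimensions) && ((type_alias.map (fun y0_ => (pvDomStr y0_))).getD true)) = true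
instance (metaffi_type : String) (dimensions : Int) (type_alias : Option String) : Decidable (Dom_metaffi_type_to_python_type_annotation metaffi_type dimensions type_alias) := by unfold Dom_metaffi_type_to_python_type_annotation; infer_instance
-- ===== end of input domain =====

-- B is a flat non-recursive version of A (suffix strip + single lookup + one wrap); proved equal on all inputs.

-- ===== PORT A =====
-- the literal dict from the Python source (same literal in A and in B's source, so shared here);
-- "type_alias if type_alias else \"Any\"" : None and "" are falsy
def pvTypeMapping (type_alias : Option String) : PySem.Dict String String :=
  PySem.Dict.ofList
    [("int8", "int"), ("int16", "int"), ("int32", "int"), ("int64", "int"),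
     ("uint8", "int"), ("uint16", "int"), ("uint32", "int"), ("uint64", "int"),
     ("float32", "float"), ("float64", "float"),
     ("string8", "str"), ("string16", "str"), ("string32", "str"),
     ("char8", "str"), ("char16", "str"), ("char32", "str"),
     ("bool", "bool"),
     ("handle", match type_alias with | some a => if a = "" then "Any" else a | none => "Any"),
     ("callable", "Any"), ("any", "Any"), ("null", "None"), ("size", "int")]

-- the dimensions = 0 body of A (A's recursive call is always with dimensions = 0)
def pvABase (metaffi_type : String) (type_alias : Option String) : String :=
  let type_mapping := pvTypeMapping type_alias
  if PySem.Str.endswith metaffi_type "_array" then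
    let base_type := PySem.Str.slice metaffi_type none (some (-6))   -- metaffi_type[:-6]
    "List[" ++ PySem.Dict.getD type_mapping base_type "Any" ++ "]"
  else
    PySem.Dict.getD type_mapping metaffi_type "Any"

def metaffi_type_to_python_type_annotation (metaffi_type : String) (dimensions : Int) (type_alias : Option String) : String :=
  if dimensions > 0 then
    let base_type := pvABase metaffi_type type_alias
    (List.range dimensions.toNat).foldl (fun result _ => "List[" ++ result ++ "]") base_type
  else
    pvABase metaffi_type type_alias

-- ===== PORT B =====
-- "List[" * n  (Python string repetition)
def pvStrRepeat (s : String) (n : Int) : String :=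
  String.ofList (PySem.List.pyRepeat s.toList n)

def metaffi_type_to_python_type_annotation_alt (metaffi_type : String) (dimensions : Int) (type_alias : Option String) : String :=
  let suffix := PySem.Str.endswith metaffi_type "_array"
  let wraps : Int := max dimensions 0 + (if suffix then 1 else 0)
  let core := if suffix then PySem.Str.slice metaffi_type none (some (-6)) else metaffi_type
  pvStrRepeat "List[" wraps ++ PySem.Dict.getD (pvTypeMapping type_alias) core "Any" ++ pvStrRepeat "]" wraps

-- ===== PRECONDITION & SPEC =====
def Spec_metaffi_type_to_python_type_annotation (metaffi_type : String) (dimensions : Int) (type_alias : Option String) (out : String) : Prop := out = metaffi_type_to_python_type_annotation_alt metaffi_type dimensions type_alias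
instance (metaffi_type : String) (dimensions : Int) (type_alias : Option String) (out : String) : Decidable (Spec_metaffi_type_to_python_type_annotation metaffi_type dimensions type_alias out) := by unfold Spec_metaffi_type_to_python_type_annotation; infer_instance

-- ===== CLAIM (what is proved, stated in full; the proofs are below) =====
def Claim_equal_metaffi_type_to_python_type_annotation : Prop := ∀ (metaffi_type : String) (dimensions : Int) (type_alias : Option String), Dom_metaffi_type_to_python_type_annotation metaffi_type dimensions type_alias → Spec_metaffi_type_to_python_type_annotation metaffi_type dimensions type_alias (metaffi_type_to_python_type_annotation metaffi_type dimensions type_alias)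

-- ===== LEMMAS AND PROOFS =====

lemma pvRepeat_succ_r (s : List Char) (n : Nat) :
    PySem.List.pyRepeat s ((n : Int) + 1) = PySem.List.pyRepeat s (n : Int) ++ s := by
  simp [PySem.List.pyRepeat, List.replicate_succ']

lemma pvRepeat_succ_l (s : List Char) (n : Nat) :
    PySem.List.pyRepeat s ((n : Int) + 1) = s ++ PySem.List.pyRepeat s (n : Int) := by
  simp [PySem.List.pyRepeat, List.replicate_succ]

lemma pvStrRepeat_succ_r (s : String) (n : Nat) :
    pvStrRepeat s ((n : Int) + 1) = pvStrRepeat s (n : Int) ++ s := by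
  simp only [pvStrRepeat, pvRepeat_succ_r, String.ofList_append]
  simp

lemma pvStrRepeat_succ_l (s : String) (n : Nat) :
    pvStrRepeat s ((n : Int) + 1) = s ++ pvStrRepeat s (n : Int) := by
  simp only [pvStrRepeat, pvRepeat_succ_l, String.ofList_append]
  simp

lemma pvStrRepeat_zero (s : String) : pvStrRepeat s 0 = "" := by
  simp [pvStrRepeat, PySem.List.pyRepeat]

lemma pvWrap_eq (n : Nat) (s : String) :
    (List.range n).foldl (fun result _ => "List[" ++ result ++ "]") s
      = pvStrRepeat "List[" (n : Int) ++ s ++ pvStrRepeat "]" (n : Int) := by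
  induction n generalizing s with
  | zero =>
      simp only [Nat.cast_zero, pvStrRepeat_zero, List.range_zero, List.foldl_nil]
      simp
  | succ n ih =>
      rw [List.range_succ, List.foldl_append]
      simp only [List.foldl_cons, List.foldl_nil]
      rw [ih, Nat.cast_add, Nat.cast_one, pvStrRepeat_succ_l "List[" n, pvStrRepeat_succ_r "]" n]
      simp [String.append_assoc]

-- ===== VERDICT (by name: the statement is the Claim_ definition above) =====
theorem metaffi_type_to_python_type_annotation_spec : Claim_equal_metaffi_type_to_python_type_annotation := by
  intro mt dims ta _
  unfold Spec_metaffi_type_to_python_type_annotation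
  unfold metaffi_type_to_python_type_annotation metaffi_type_to_python_type_annotation_alt
  by_cases hd : dims > 0
  · have hdn : ((dims.toNat : Nat) : Int) = dims := Int.toNat_of_nonneg hd.le
    have hmax : max dims 0 = dims := max_eq_left hd.le
    rw [if_pos hd]
    cases hs : PySem.Str.endswith mt "_array" with
    | false =>
        simp only [pvABase, hs, Bool.false_eq_true, if_false, hmax, add_zero]
        rw [pvWrap_eq, hdn]
    | true =>
        simp only [pvABase, hs, if_true, hmax]
        have h1 : dims + 1 = ((dims.toNat : Nat) : Int) + 1 := by rw [hdn]
        rw [pvWrap_eq, h1, pvStrRepeat_succ_r "List[" dims.toNat, pvStrRepeat_succ_l "]" dims.toNat, hdn]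
        simp [String.append_assoc]
  · have hmax : max dims 0 = 0 := max_eq_right (le_of_not_gt hd)
    rw [if_neg hd]
    cases hs : PySem.Str.endswith mt "_array" with
    | false =>
        simp only [pvABase, hs, Bool.false_eq_true, if_false, hmax, add_zero, pvStrRepeat_zero]
        simp
    | true =>
        simp only [pvABase, hs, if_true, hmax, zero_add]
        rw [show (1 : Int) = ((0 : Nat) : Int) + 1 from rfl, pvStrRepeat_succ_r "List[" 0,
            pvStrRepeat_succ_l "]" 0]
        simp only [Nat.cast_zero, pvStrRepeat_zero]
        simp [String.append_assoc]
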